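-- pv_equiv track=rewrite | github.com/tweber36/CodinGame | MEDIUM_TelephoneNumbers.py | calculate_elements
-- ===== SOURCE A (Python) =====
-- from itertools import groupby
--
-- def calculate_elements(numbers):
--     """
--     Recursive function to calculate the numbers of elements necessary to store a list of numbers.
--
--     If there is only 1 number, it returns the length of the number
--     Otherwise, it groups numbers by their first number because we need to store it only once
--     Then send a recursive call with a sub-list of each group without the first number
--     (until there's only one number left in the sub-list)
--     :param numbers: A list of numbers - but string format !
--     :return: The count of elements necessary to store all the numbers following the implementation given.
--     """
--     if len(numbers) == 1:
--         return len(numbers[0])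
--
--     count = 0
--
--     for value, group in groupby(numbers, key=lambda x: x[0]):
--         count += 1
--         new_numbers = sorted(p[1:] for p in group if len(p) > 1)
--         count += calculate_elements(new_numbers)
--
--     return count
-- ===== SOURCE B (Python) =====
-- def calculate_elements(numbers):
--     """Non-recursive re-implementation: split the input into consecutive runs of
--     equal first character; each run contributes the number of DISTINCT nonempty
--     prefixes of its strings (collected in a set). No sorting, no recursion."""
--     if len(numbers) == 1:
--         return len(numbers[0])
--     count = 0
--     i, n = 0, len(numbers)
--     while i < n:
--         c = numbers[i][0]
--         prefixes = set()
--         while i < n and numbers[i][0] == c: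
--             s = numbers[i]
--             for k in range(1, len(s) + 1):
--                 prefixes.add(s[:k])
--             i += 1
--         count += len(prefixes)
--     return count
-- ===== Notes on version B (the rewrite author's own statement) =====
-- stated objective: alternative
-- what changed: A's recursion (groupby per level, sort each sub-list, recurse on suffixes) is replaced by a single left-to-right scan that splits the input into consecutive runs of equal first character and counts each run's distinct nonempty prefixes with a set; no sorting and no recursion into sub-lists.
import Mathlib
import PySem

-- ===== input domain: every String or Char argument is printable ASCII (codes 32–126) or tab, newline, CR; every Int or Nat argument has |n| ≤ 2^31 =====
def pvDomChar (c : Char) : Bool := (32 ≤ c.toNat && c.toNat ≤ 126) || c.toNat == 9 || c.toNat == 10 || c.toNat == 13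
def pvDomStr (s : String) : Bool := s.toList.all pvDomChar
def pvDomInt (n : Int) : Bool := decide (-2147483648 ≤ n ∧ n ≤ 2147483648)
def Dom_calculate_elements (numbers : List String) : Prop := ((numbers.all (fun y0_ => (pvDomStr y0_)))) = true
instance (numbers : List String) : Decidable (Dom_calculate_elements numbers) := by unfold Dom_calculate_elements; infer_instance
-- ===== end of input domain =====

-- B replaces A's recursion entirely: it scans the input once, splitting it into
-- consecutive runs of equal first character, and counts each run's distinct
-- nonempty prefixes with a set — no sorting, no recursion into sub-lists
-- (objective: alternative algorithm, same asymptotic cost).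

-- ===== PORT A =====
-- itertools.groupby(l, key=lambda x: x[0]): consecutive runs of equal keys;
-- x[0] ported as Str.pyGet? (none exactly where Python raises IndexError, excluded by Pre_)
def pvKey (s : String) : Option Char := PySem.Str.pyGet? s 0

def pvGroupby : List String → List (Option Char × List String)
  | [] => []
  | x :: xs =>
    (pvKey x, x :: xs.takeWhile (fun y => pvKey y == pvKey x)) ::
      pvGroupby (xs.dropWhile (fun y => pvKey y == pvKey x))
termination_by l => l.length
decreasing_by
  simp only [List.length_cons]
  exact Nat.lt_succ_of_le (List.length_dropWhile_le _ _)

-- sorted(p[1:] for p in group if len(p) > 1)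
def pvNew (g : List String) : List String :=
  PySem.List.sorted ((g.filter (fun p => 1 < PySem.Str.len p)).map
    (fun p => PySem.Str.slice p (some 1) none)) (fun x => x) false

-- termination measure for A's port: Σ (len s + 1); the lemmas through pvGroup_mu_le
-- are cited by the port's decreasing_by block
def pvMu (l : List String) : Nat := (l.map (fun s => s.toList.length + 1)).sum

theorem pvSum_filter_le (l : List String) (P : String → Bool) (f : String → Nat) :
    ((l.filter P).map f).sum ≤ (l.map f).sum := by
  induction l with
  | nil => simp
  | cons x xs ih => by_cases h : P x <;> simp [h] <;> omega

theorem pvMu_eq (l : List String) : pvMu l = (l.map (fun s => s.toList.length)).sum + l.length := by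
  induction l with
  | nil => rfl
  | cons x xs ih =>
    unfold pvMu at ih ⊢
    simp only [List.map_cons, List.sum_cons, List.length_cons]
    omega

theorem pvNew_mu_lt (g : List String) (hg : g ≠ []) : pvMu (pvNew g) + 1 ≤ pvMu g := by
  have h1 : pvMu (pvNew g)
      = ((g.filter (fun p => 1 < PySem.Str.len p)).map
          (fun p => (PySem.Str.slice p (some 1) none).toList.length + 1)).sum := by
    unfold pvMu pvNew
    rw [List.Perm.sum_eq ((PySem.List.sorted_perm _ _ _).map _), List.map_map]
    rfl
  have h2 : (g.filter (fun p => 1 < PySem.Str.len p)).map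
        (fun p => (PySem.Str.slice p (some 1) none).toList.length + 1)
      = (g.filter (fun p => 1 < PySem.Str.len p)).map (fun p => p.toList.length) := by
    apply List.map_congr_left
    intro p hp
    have hP := (List.mem_filter.mp hp).2
    have hle := PySem.Str.len_eq p
    have hlen : 1 < p.toList.length := by
      simp only [decide_eq_true_eq] at hP
      omega
    have hsl : (PySem.Str.slice p (some 1) none).toList = p.toList.tail := by
      simp [PySem.Str.slice, PySem.List.slice_from_one]
    rw [hsl, List.length_tail]
    omega
  have h3 := pvSum_filter_le g (fun p => 1 < PySem.Str.len p) (fun p => p.toList.length)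
  have h4 := pvMu_eq g
  have h5 : 0 < g.length := List.length_pos_iff.mpr hg
  rw [h1, h2]; omega

theorem pvGroupby_flatten (l : List String) : ((pvGroupby l).map Prod.snd).flatten = l := by
  induction l using pvGroupby.induct with
  | case1 => rw [pvGroupby]; rfl
  | case2 x xs ih =>
    rw [pvGroupby]
    simp only [List.map_cons, List.flatten_cons]
    rw [ih, List.cons_append, List.takeWhile_append_dropWhile]

theorem pvMu_flatten (ls : List (List String)) : pvMu ls.flatten = (ls.map pvMu).sum := by
  induction ls with
  | nil => rfl
  | cons a b ih => simp only [List.flatten_cons, List.map_cons, List.sum_cons, ← ih, pvMu,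
      List.map_append, List.sum_append]

theorem pvGroup_ne_nil {l : List String} {g : Option Char × List String}
    (h : g ∈ pvGroupby l) : g.2 ≠ [] := by
  induction l using pvGroupby.induct with
  | case1 => simp [pvGroupby] at h
  | case2 x xs ih =>
    rw [pvGroupby] at h
    rcases List.mem_cons.mp h with h1 | h2
    · subst h1; simp
    · exact ih h2

theorem pvGroup_mu_le {l : List String} {g : Option Char × List String}
    (h : g ∈ pvGroupby l) : pvMu g.2 ≤ pvMu l := by
  have := pvGroupby_flatten l
  calc pvMu g.2 ≤ (((pvGroupby l).map Prod.snd).map pvMu).sum := by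
        exact List.le_sum_of_mem (List.mem_map_of_mem (List.mem_map_of_mem h))
    _ = pvMu l := by rw [← pvMu_flatten, this]

def calculate_elements (numbers : List String) : Int :=
  if numbers.length = 1 then
    match PySem.List.pyGet? numbers 0 with
    | some s => PySem.Str.len s
    | none => 0
  else
    (pvGroupby numbers).attach.foldl
      (fun count g => count + 1 + calculate_elements (pvNew g.1.2)) 0
termination_by pvMu numbers
decreasing_by
  exact Nat.lt_of_lt_of_le (Nat.lt_of_succ_le (pvNew_mu_lt _ (pvGroup_ne_nil g.2)))
    (pvGroup_mu_le g.2)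

-- ===== PORT B =====
-- inner 'for k in range(1, len(s)+1): prefixes.add(s[:k])' of Source B
def pvAddPrefixes (st : PySem.Set String) (s : String) : PySem.Set String :=
  (PySem.List.pyRange 1 (PySem.Str.len s + 1)).foldl
    (fun st k => PySem.Set.add st (PySem.Str.slice s none (some k))) st

-- the outer while loop of Source B: pop one consecutive run of equal first character,
-- add the size of its prefix set, continue with the remainder
def pvRunLoop : List String → Int
  | [] => 0
  | x :: xs =>
    PySem.Set.len
      ((x :: xs.takeWhile (fun y => PySem.Str.pyGet? y 0 == PySem.Str.pyGet? x 0)).foldl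
        pvAddPrefixes PySem.Set.empty)
      + pvRunLoop (xs.dropWhile (fun y => PySem.Str.pyGet? y 0 == PySem.Str.pyGet? x 0))
termination_by l => l.length
decreasing_by
  simp only [List.length_cons]
  exact Nat.lt_succ_of_le (List.length_dropWhile_le _ _)

def calculate_elements_alt (numbers : List String) : Int :=
  if numbers.length = 1 then
    match PySem.List.pyGet? numbers 0 with
    | some s => PySem.Str.len s
    | none => 0
  else pvRunLoop numbers

-- ===== PRECONDITION & SPEC =====
-- Pre_ excludes exactly the inputs where Python A raises IndexError (an empty string
-- in a list of length ≠ 1 reaches x[0]); Python B raises the same error there.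
def Pre_calculate_elements (numbers : List String) : Prop :=
  numbers.length = 1 ∨ "" ∉ numbers
instance (numbers : List String) : Decidable (Pre_calculate_elements numbers) := by
  unfold Pre_calculate_elements; infer_instance

def pvWitness_calculate_elements : List String := (["42", "423", "5"])

def Spec_calculate_elements (numbers : List String) (out : Int) : Prop := out = calculate_elements_alt numbers
instance (numbers : List String) (out : Int) : Decidable (Spec_calculate_elements numbers out) := by unfold Spec_calculate_elements; infer_instance

-- ===== CLAIM (what is proved, stated in full; the proofs are below) =====
def Claim_equal_calculate_elements : Prop := ∀ (numbers : List String), Dom_calculate_elements numbers → Pre_calculate_elements numbers → Spec_calculate_elements numbers (calculate_elements numbers)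

-- ===== LEMMAS AND PROOFS =====
-- the list of nonempty prefixes s[:1], …, s[:len(s)] of one string, and of a list of strings
def pvPrefs (s : String) : List String :=
  (PySem.List.pyRange 1 (PySem.Str.len s + 1)).map (fun k => PySem.Str.slice s none (some k))

def pvPrefList (l : List String) : List String := l.flatMap pvPrefs

-- B's per-run count, as the number of distinct elements of pvPrefList
def pvCnt (l : List String) : Int := ((PySem.Set.ofList (pvPrefList l)).length : Int)

-- A's value rewritten as a sum over groupby runs of the distinct-prefix count
def pvG (l : List String) : Int := ((pvGroupby l).map (fun g => pvCnt g.2)).sum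

theorem pvAddPrefixes_eq (st : PySem.Set String) (s : String) :
    pvAddPrefixes st s = st.update (pvPrefs s) := by
  rw [pvAddPrefixes, pvPrefs, PySem.Set.update_map_eq_foldl_add]

theorem pvFoldAdd_eq (l : List String) (st : PySem.Set String) :
    l.foldl pvAddPrefixes st = st.update (pvPrefList l) := by
  induction l generalizing st with
  | nil => simp [pvPrefList, PySem.Set.update]
  | cons x xs ih =>
    simp only [List.foldl_cons, ih, pvAddPrefixes_eq, pvPrefList, List.flatMap_cons,
      ← PySem.Set.update_append]

theorem pvRunLoop_eq (l : List String) : pvRunLoop l = pvG l := by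
  induction l using pvGroupby.induct with
  | case1 => rw [pvRunLoop, pvG, pvGroupby]; rfl
  | case2 x xs ih =>
    rw [pvRunLoop, pvG, pvGroupby]
    simp only [List.map_cons, List.sum_cons]
    rw [← pvG, ← ih]
    congr 1
    rw [pvFoldAdd_eq]
    simp [pvCnt, PySem.Set.len, PySem.Set.update_nil_left, pvKey]

-- membership in the prefix list of one string
theorem pvMem_prefs {t s : String} :
    t ∈ pvPrefs s ↔ ∃ k : Nat, 1 ≤ k ∧ k ≤ s.toList.length ∧ t.toList = s.toList.take k := by
  simp only [pvPrefs, List.mem_map, PySem.List.mem_pyRange_one]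
  constructor
  · rintro ⟨k, ⟨hk1, hk2⟩, rfl⟩
    have hlen := PySem.Str.len_eq s
    have hk2' : k ≤ (s.toList.length : Int) := by omega
    refine ⟨k.toNat, by omega, by omega, ?_⟩
    rw [PySem.Str.toList_slice, PySem.Chars.slice_eq_listSlice]
    exact PySem.List.slice_to _ (by omega)
  · rintro ⟨k, hk1, hk2, ht⟩
    have hlen := PySem.Str.len_eq s
    refine ⟨(k : Int), ⟨by omega, by omega⟩, ?_⟩
    apply String.ext_iff.mpr
    rw [PySem.Str.toList_slice, PySem.Chars.slice_eq_listSlice,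
      PySem.List.slice_to _ (by omega), ht]
    simp

theorem pvPrefs_ne_empty {t s : String} (h : t ∈ pvPrefs s) : t.toList ≠ [] := by
  obtain ⟨k, hk1, hk2, ht⟩ := pvMem_prefs.mp h
  have hlt : t.toList.length = k := by rw [ht]; exact List.length_take_of_le hk2
  intro hnil
  rw [hnil] at hlt
  simp at hlt
  omega

theorem pvPrefs_head {t s : String} (h : t ∈ pvPrefs s) : t.toList.head? = s.toList.head? := by
  obtain ⟨k, hk1, hk2, ht⟩ := pvMem_prefs.mp h
  cases hs : s.toList with
  | nil => rw [hs] at ht hk2; simp at hk2; omega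
  | cons a l =>
    rw [hs] at ht
    obtain ⟨k', rfl⟩ : ∃ k', k = k' + 1 := ⟨k - 1, by omega⟩
    simp [ht]

theorem pvMem_prefList {t : String} {l : List String} :
    t ∈ pvPrefList l ↔ ∃ s ∈ l, t ∈ pvPrefs s := by
  simp [pvPrefList]

-- the number of distinct elements is invariant under permutation of the generating list
theorem pvOfList_length_perm {α : Type} [BEq α] [LawfulBEq α] {xs ys : List α}
    (h : xs.Perm ys) : (PySem.Set.ofList xs).length = (PySem.Set.ofList ys).length := by
  refine List.Perm.length_eq ?_
  refine (List.perm_ext_iff_of_nodup (PySem.Set.nodup_ofList xs)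
    (PySem.Set.nodup_ofList ys)).mpr ?_
  intro a
  simp [PySem.Set.mem_ofList, h.mem_iff]

-- distinct-prefix count of an append with disjoint prefix sets
theorem pvCnt_append {a b : List String}
    (hd : ∀ t ∈ pvPrefList a, t ∉ pvPrefList b) :
    pvCnt (a ++ b) = pvCnt a + pvCnt b := by
  have hsplit : pvPrefList (a ++ b) = pvPrefList a ++ pvPrefList b := by
    simp [pvPrefList]
  have hfil : (PySem.Set.ofList (pvPrefList b)).filter
      (fun y => !(PySem.Set.ofList (pvPrefList a)).contains y) = PySem.Set.ofList (pvPrefList b) := by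
    apply List.filter_eq_self.mpr
    intro y hy
    have hyb : y ∈ pvPrefList b := (PySem.Set.mem_ofList _ _).mp hy
    have hya : y ∉ PySem.Set.ofList (pvPrefList a) := by
      intro hmem
      exact hd y ((PySem.Set.mem_ofList _ _).mp hmem) hyb
    simp [hya]
  unfold pvCnt
  rw [hsplit, PySem.Set.ofList_append, PySem.Set.update_eq_append_filter, hfil,
    List.length_append]
  push_cast
  ring

-- a run of strings all starting with c: its distinct prefixes are "c" plus c-prefixed
-- copies of the distinct prefixes of the tails of its length-≥2 members
theorem pvCnt_run {g : List String} {c : Char} (hg : g ≠ [])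
    (hc : ∀ s ∈ g, s.toList.head? = some c) :
    pvCnt g = 1 + pvCnt ((g.filter (fun p => 1 < PySem.Str.len p)).map
      (fun p => PySem.Str.slice p (some 1) none)) := by
  set T := (g.filter (fun p => 1 < PySem.Str.len p)).map
      (fun p => PySem.Str.slice p (some 1) none) with hT
  have htl : ∀ p : String, (PySem.Str.slice p (some 1) none).toList = p.toList.tail := by
    intro p
    rw [PySem.Str.toList_slice, PySem.Chars.slice_eq_listSlice, PySem.List.slice_from_one]
  -- membership characterisation of the run's prefixes
  have M : ∀ t : String, t ∈ pvPrefList g ↔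
      (t.toList = [c] ∨ ∃ t' ∈ pvPrefList T, t.toList = c :: t'.toList) := by
    intro t
    constructor
    · intro ht
      obtain ⟨s, hsg, hts⟩ := pvMem_prefList.mp ht
      obtain ⟨k, hk1, hk2, htk⟩ := pvMem_prefs.mp hts
      obtain ⟨r, hs⟩ : ∃ r, s.toList = c :: r := by
        cases hsl : s.toList with
        | nil => have := hc s hsg; rw [hsl] at this; simp at this
        | cons a l =>
          have := hc s hsg; rw [hsl] at this; simp at this
          exact ⟨l, by rw [this]⟩
      rw [hs] at htk hk2
      simp only [List.length_cons] at hk2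
      match k, hk1 with
      | 1, _ => left; simpa using htk
      | (k'' + 2), _ =>
        right
        have hr : 1 ≤ r.length := by omega
        have hp'T : PySem.Str.slice s (some 1) none ∈ T := by
          rw [hT]
          refine List.mem_map_of_mem (List.mem_filter.mpr ⟨hsg, ?_⟩)
          simp only [PySem.Str.len_eq, hs, List.length_cons, decide_eq_true_eq]
          push_cast
          omega
        refine ⟨String.ofList (r.take (k'' + 1)), ?_, ?_⟩
        · refine pvMem_prefList.mpr ⟨_, hp'T, pvMem_prefs.mpr ⟨k'' + 1, by omega, ?_, ?_⟩⟩
          · rw [htl, hs]; simpa using by omega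
          · rw [String.toList_ofList, htl, hs, List.tail_cons]
        · rw [String.toList_ofList, htk]
          simp
    · intro h
      rcases h with h | ⟨t', ht', htc⟩
      · obtain ⟨x, g', rfl⟩ : ∃ x g', g = x :: g' := by
          cases g with
          | nil => exact absurd rfl hg
          | cons x g' => exact ⟨x, g', rfl⟩
        obtain ⟨r, hx⟩ : ∃ r, x.toList = c :: r := by
          cases hsl : x.toList with
          | nil => have := hc x (by simp); rw [hsl] at this; simp at this
          | cons a l =>
            have := hc x (by simp); rw [hsl] at this; simp at this
            exact ⟨l, by rw [this]⟩
        refine pvMem_prefList.mpr ⟨x, by simp, pvMem_prefs.mpr ⟨1, le_refl 1, ?_, ?_⟩⟩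
        · rw [hx]; simp
        · rw [h, hx]; simp
      · obtain ⟨p', hp'T, htp'⟩ := pvMem_prefList.mp ht'
        rw [hT] at hp'T
        obtain ⟨p, hpf, rfl⟩ := List.mem_map.mp hp'T
        obtain ⟨hpg, hplen⟩ := List.mem_filter.mp hpf
        obtain ⟨r, hp⟩ : ∃ r, p.toList = c :: r := by
          cases hsl : p.toList with
          | nil => have := hc p hpg; rw [hsl] at this; simp at this
          | cons a l =>
            have := hc p hpg; rw [hsl] at this; simp at this
            exact ⟨l, by rw [this]⟩
        obtain ⟨k, hk1, hk2, htk⟩ := pvMem_prefs.mp htp'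
        rw [htl, hp] at htk hk2
        simp only [List.tail_cons] at htk hk2
        refine pvMem_prefList.mpr ⟨p, hpg, pvMem_prefs.mpr ⟨k + 1, by omega, ?_, ?_⟩⟩
        · rw [hp]; simp; omega
        · rw [htc, hp, htk]; simp
  -- the distinct prefixes of the run are "c" plus c-prefixed distinct prefixes of T
  have hinj : Function.Injective (fun t' : String => String.ofList (c :: t'.toList)) := by
    intro a b hab
    simp only at hab
    have := congrArg String.toList hab
    rw [String.toList_ofList, String.toList_ofList] at this
    exact String.ext_iff.mpr (by injection this)
  have hRnodup : (String.ofList [c] ::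
      (PySem.Set.ofList (pvPrefList T)).map (fun t' => String.ofList (c :: t'.toList))).Nodup := by
    refine List.nodup_cons.mpr ⟨?_, (PySem.Set.nodup_ofList _).map hinj⟩
    intro hmem
    obtain ⟨t', ht'm, ht'e⟩ := List.mem_map.mp hmem
    have := congrArg String.toList ht'e
    rw [String.toList_ofList, String.toList_ofList] at this
    have hnil : t'.toList = [] := by
      injection this with h1 h2
    obtain ⟨s', hs', hts'⟩ := pvMem_prefList.mp ((PySem.Set.mem_ofList _ _).mp ht'm)
    exact pvPrefs_ne_empty hts' hnil
  have hperm : (PySem.Set.ofList (pvPrefList g)).Perm (String.ofList [c] ::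
      (PySem.Set.ofList (pvPrefList T)).map (fun t' => String.ofList (c :: t'.toList))) := by
    refine (List.perm_ext_iff_of_nodup (PySem.Set.nodup_ofList _) hRnodup).mpr ?_
    intro a
    rw [PySem.Set.mem_ofList, M a, List.mem_cons, List.mem_map]
    constructor
    · rintro (h | ⟨t', ht', htc⟩)
      · exact Or.inl (String.ext_iff.mpr (by rw [String.toList_ofList, h]))
      · exact Or.inr ⟨t', (PySem.Set.mem_ofList _ _).mpr ht',
          (String.ext_iff.mpr (by rw [String.toList_ofList, htc])).symm⟩
    · rintro (h | ⟨t', ht', htc⟩)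
      · exact Or.inl (by rw [h, String.toList_ofList])
      · exact Or.inr ⟨t', (PySem.Set.mem_ofList _ _).mp ht',
          by rw [← htc, String.toList_ofList]⟩
  unfold pvCnt
  rw [hperm.length_eq]
  simp
  ring

-- pvKey is the first character
theorem pvKey_head (s : String) : pvKey s = s.toList.head? := by
  simp [pvKey]
  rw [PySem.List.pyGet?_zero]
  exact List.head?_eq_getElem?.symm

-- lexicographic order: the first characters of nonempty strings are ordered like the strings
theorem pvLe_head {s t : String} {a b : Char} {l m : List Char}
    (hsl : s.toList = a :: l) (htl : t.toList = b :: m) (h : s ≤ t) : a ≤ b := by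
  by_contra hab
  rw [not_le] at hab
  have hts : t < s := by
    rw [String.lt_iff_toList_lt, hsl, htl]
    exact List.Lex.rel hab
  exact absurd (lt_of_lt_of_le hts h) (lt_irrefl t)

-- pvCnt is invariant under permutation of the run
theorem pvCnt_perm {a b : List String} (h : a.Perm b) : pvCnt a = pvCnt b := by
  unfold pvCnt
  exact_mod_cast pvOfList_length_perm (List.Perm.flatMap_right pvPrefs h)

-- distinct-prefix count of a singleton: the prefixes s[:1], …, s[:len] are pairwise distinct
theorem pvCnt_single (s : String) : pvCnt [s] = PySem.Str.len s := by
  have hpl : pvPrefList [s] = pvPrefs s := by simp [pvPrefList]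
  have hnd : (pvPrefs s).Nodup := by
    refine List.Nodup.map_on ?_ (PySem.List.nodup_pyRange_one 1 (PySem.Str.len s + 1))
    intro k1 hk1 k2 hk2 heq
    rw [PySem.List.mem_pyRange_one] at hk1 hk2
    have hlen := PySem.Str.len_eq s
    have := congrArg (fun u : String => u.toList.length) heq
    simp only [PySem.Str.toList_slice, PySem.Chars.slice_eq_listSlice] at this
    rw [PySem.List.slice_to _ (by omega), PySem.List.slice_to _ (by omega)] at this
    simp only [List.length_take] at this
    omega
  have hlp : (pvPrefs s).length = s.toList.length := by
    unfold pvPrefs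
    rw [List.length_map, PySem.List.length_pyRange_one]
    have hlen := PySem.Str.len_eq s
    omega
  unfold pvCnt
  rw [hpl, PySem.Set.ofList_eq_self_of_nodup _ hnd, hlp, PySem.Str.len_eq]

-- on a ≤-sorted list of nonempty strings the groupby sum equals the global distinct-prefix count
theorem pvG_sorted {M : List String} (hne : ∀ s ∈ M, s.toList ≠ [])
    (hs : M.Pairwise (· ≤ ·)) : pvG M = pvCnt M := by
  induction M using pvGroupby.induct with
  | case1 =>
    rw [pvG, pvGroupby]
    simp [pvCnt, pvPrefList]
  | case2 x xs ih =>
    have hxne := hne x (by simp)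
    obtain ⟨cx, rx, hx⟩ : ∃ c r, x.toList = c :: r := by
      cases h : x.toList with
      | nil => exact absurd h hxne
      | cons a l => exact ⟨a, l, rfl⟩
    have hxle : ∀ y ∈ xs, x ≤ y := (List.pairwise_cons.mp hs).1
    have hxs_pair : xs.Pairwise (· ≤ ·) := (List.pairwise_cons.mp hs).2
    have hrest_sub : ∀ s ∈ xs.dropWhile (fun y => pvKey y == pvKey x), s ∈ xs :=
      fun s h => List.IsSuffix.mem h (List.dropWhile_suffix _)
    have hrest_pair : (xs.dropWhile (fun y => pvKey y == pvKey x)).Pairwise (· ≤ ·) :=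
      List.Pairwise.sublist (List.dropWhile_sublist _) hxs_pair
    have hrest_ne : ∀ s ∈ xs.dropWhile (fun y => pvKey y == pvKey x), pvKey s ≠ pvKey x := by
      cases hr : xs.dropWhile (fun y => pvKey y == pvKey x) with
      | nil => simp
      | cons h0 tl =>
        have hph0 : (pvKey h0 == pvKey x) = false := by
          have hne' : xs.dropWhile (fun y => pvKey y == pvKey x) ≠ [] := by rw [hr]; simp
          have h := List.head_dropWhile_not (fun y => pvKey y == pvKey x) hne'
          have h2 : (xs.dropWhile (fun y => pvKey y == pvKey x)).head hne' = h0 := by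
            simp [hr]
          rwa [h2] at h
        intro s hsr hkey
        have hh0xs : h0 ∈ xs := hrest_sub h0 (by rw [hr]; simp)
        have hh0M : h0.toList ≠ [] := hne h0 (by simp [hh0xs])
        obtain ⟨c0, r0, h0l⟩ : ∃ c r, h0.toList = c :: r := by
          cases h : h0.toList with
          | nil => exact absurd h hh0M
          | cons a l => exact ⟨a, l, rfl⟩
        have hsxs : s ∈ xs := hrest_sub s (by rw [hr]; exact hsr)
        have hsM : s.toList ≠ [] := hne s (by simp [hsxs])
        obtain ⟨css, rss, hsl⟩ : ∃ c r, s.toList = c :: r := by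
          cases h : s.toList with
          | nil => exact absurd h hsM
          | cons a l => exact ⟨a, l, rfl⟩
        have hc0 : cx ≤ c0 := pvLe_head hx h0l (hxle h0 hh0xs)
        have hc0s : c0 ≤ css := by
          rcases List.mem_cons.mp hsr with rfl | hstl
          · have heq : c0 :: r0 = css :: rss := h0l.symm.trans hsl
            injection heq with h _
            exact le_of_eq h
          · exact pvLe_head h0l hsl
              ((List.pairwise_cons.mp (hr ▸ hrest_pair)).1 s hstl)

        have hkx : pvKey x = some cx := by rw [pvKey_head, hx]; rfl
        have hk0 : pvKey h0 = some c0 := by rw [pvKey_head, h0l]; rfl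
        have hks : pvKey s = some css := by rw [pvKey_head, hsl]; rfl
        have hc0x : c0 ≠ cx := by
          intro h
          rw [hkx, hk0, h] at hph0
          simp at hph0
        rw [hks, hkx] at hkey
        have : css = cx := by injection hkey
        exact hc0x (le_antisymm (this ▸ hc0s) hc0)
    have hG : pvG (x :: xs)
        = pvCnt (x :: xs.takeWhile (fun y => pvKey y == pvKey x))
          + pvG (xs.dropWhile (fun y => pvKey y == pvKey x)) := by
      rw [pvG, pvGroupby]
      simp only [List.map_cons, List.sum_cons]
      rfl
    have hrest_hne : ∀ s ∈ xs.dropWhile (fun y => pvKey y == pvKey x), s.toList ≠ [] :=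
      fun s h => hne s (by simp [hrest_sub s h])
    rw [hG, ih hrest_hne hrest_pair]
    -- disjointness of prefix sets of the run and of the rest
    have hrunkey : ∀ s ∈ x :: xs.takeWhile (fun y => pvKey y == pvKey x),
        s.toList.head? = some cx := by
      intro s hsr
      rcases List.mem_cons.mp hsr with rfl | hstw
      · rw [hx]; rfl
      · have := List.mem_takeWhile_imp hstw
        simp only [beq_iff_eq] at this
        rw [← pvKey_head, this, pvKey_head, hx]; rfl
    have hd : ∀ t ∈ pvPrefList (x :: xs.takeWhile (fun y => pvKey y == pvKey x)),
        t ∉ pvPrefList (xs.dropWhile (fun y => pvKey y == pvKey x)) := by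
      intro t hta htb
      obtain ⟨s1, hs1, ht1⟩ := pvMem_prefList.mp hta
      obtain ⟨s2, hs2, ht2⟩ := pvMem_prefList.mp htb
      have h1 : t.toList.head? = some cx := by rw [pvPrefs_head ht1]; exact hrunkey s1 hs1
      have h2 : pvKey s2 ≠ pvKey x := hrest_ne s2 hs2
      have hkx : pvKey x = some cx := by rw [pvKey_head, hx]; rfl
      rw [pvPrefs_head ht2, ← pvKey_head] at h1
      exact h2 (h1.trans hkx.symm)
    rw [← pvCnt_append hd, List.cons_append, List.takeWhile_append_dropWhile]

-- A's fold over the groups, written as a sum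
theorem pvFold_sum (gs : List (Option Char × List String)) (a : Int) :
    gs.foldl (fun count g => count + 1 + calculate_elements (pvNew g.2)) a
      = a + ((gs.map (fun g => 1 + calculate_elements (pvNew g.2))).sum) := by
  induction gs generalizing a with
  | nil => simp
  | cons g gs ih =>
    simp only [List.foldl_cons, ih, List.map_cons, List.sum_cons]
    ring

-- every member of a group is a member of the grouped list
theorem pvGroup_mem {l : List String} {g : Option Char × List String}
    (h : g ∈ pvGroupby l) {s : String} (hs : s ∈ g.2) : s ∈ l := by
  rw [← pvGroupby_flatten l]
  exact List.mem_flatten.mpr ⟨g.2, List.mem_map_of_mem h, hs⟩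

-- every member of a group has the group's key
theorem pvGroup_key {l : List String} {g : Option Char × List String}
    (h : g ∈ pvGroupby l) : ∀ s ∈ g.2, pvKey s = g.1 := by
  induction l using pvGroupby.induct with
  | case1 => simp [pvGroupby] at h
  | case2 x xs ih =>
    rw [pvGroupby] at h
    rcases List.mem_cons.mp h with h1 | h2
    · subst h1
      intro s hs
      rcases List.mem_cons.mp hs with rfl | hstw
      · rfl
      · simpa using List.mem_takeWhile_imp hstw
    · exact ih h2

-- main invariant: on a list of nonempty strings A computes the per-run distinct-prefix sum
theorem pvA_aux : ∀ (n : Nat) (L : List String), pvMu L ≤ n → (∀ s ∈ L, s.toList ≠ []) →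
    calculate_elements L = pvG L := by
  intro n
  induction n with
  | zero =>
    intro L hmu _
    have hL : L = [] := by
      cases L with
      | nil => rfl
      | cons x xs => unfold pvMu at hmu; simp at hmu
    subst hL
    rw [calculate_elements, pvG, pvGroupby]
    simp
  | succ n ih =>
    intro L hmu hne
    by_cases h1 : L.length = 1
    · obtain ⟨s, rfl⟩ : ∃ s, L = [s] := by
        cases L with
        | nil => simp at h1
        | cons x xs =>
          cases xs with
          | nil => exact ⟨x, rfl⟩
          | cons y ys => simp at h1
      rw [calculate_elements]
      simp only [List.length_cons, List.length_nil]
      rw [pvG, pvGroupby]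
      simp only [List.takeWhile_nil, List.dropWhile_nil, List.map_cons, List.sum_cons]
      rw [pvGroupby]
      simp only [List.map_nil, List.sum_nil, add_zero]
      rw [pvCnt_single]
      rfl
    · rw [calculate_elements, if_neg h1]
      refine Eq.trans (List.foldl_attach
        (f := fun (count : Int) (g : Option Char × List String) =>
          count + 1 + calculate_elements (pvNew g.2))) ?_
      rw [pvFold_sum, zero_add]
      have hcong : (pvGroupby L).map (fun g => 1 + calculate_elements (pvNew g.2))
          = (pvGroupby L).map (fun g => pvCnt g.2) := by
        apply List.map_congr_left
        intro g hg
        have hgne : g.2 ≠ [] := pvGroup_ne_nil hg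
        obtain ⟨x0, g', hx0⟩ : ∃ x0 g', g.2 = x0 :: g' := by
          cases h : g.2 with
          | nil => exact absurd h hgne
          | cons a l => exact ⟨a, l, rfl⟩
        have hx0M : x0.toList ≠ [] := hne x0 (pvGroup_mem hg (by rw [hx0]; simp))
        obtain ⟨c, r, hxc⟩ : ∃ c r, x0.toList = c :: r := by
          cases h : x0.toList with
          | nil => exact absurd h hx0M
          | cons a l => exact ⟨a, l, rfl⟩
        have hc : ∀ s ∈ g.2, s.toList.head? = some c := by
          intro s hs
          have h1' := pvGroup_key hg s hs
          have h2' := pvGroup_key hg x0 (by rw [hx0]; simp)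
          rw [← pvKey_head, h1', ← h2', pvKey_head, hxc]
          rfl
        set T := (g.2.filter (fun p => 1 < PySem.Str.len p)).map
            (fun p => PySem.Str.slice p (some 1) none) with hT
        have htl : ∀ p : String, (PySem.Str.slice p (some 1) none).toList = p.toList.tail := by
          intro p
          rw [PySem.Str.toList_slice, PySem.Chars.slice_eq_listSlice, PySem.List.slice_from_one]
        have hTne : ∀ s ∈ pvNew g.2, s.toList ≠ [] := by
          intro s hs
          rw [pvNew, PySem.List.mem_sorted, ← hT] at hs
          obtain ⟨p, hpf, rfl⟩ := List.mem_map.mp hs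
          have hp := (List.mem_filter.mp hpf).2
          simp only [PySem.Str.len_eq, decide_eq_true_eq] at hp
          rw [htl]
          intro hnil
          have hlen2 : p.toList.tail.length = 0 := by rw [hnil]; rfl
          rw [List.length_tail] at hlen2
          omega
        have hmuN : pvMu (pvNew g.2) ≤ n := by
          have h2' := pvNew_mu_lt g.2 hgne
          have h3' := pvGroup_mu_le hg
          omega
        have hA : calculate_elements (pvNew g.2) = pvG (pvNew g.2) := ih _ hmuN hTne
        have hpair : (pvNew g.2).Pairwise (· ≤ ·) := by
          have := PySem.List.sorted_pairwise
            ((g.2.filter (fun p => 1 < PySem.Str.len p)).map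
              (fun p => PySem.Str.slice p (some 1) none)) (fun x => x)
          simpa [pvNew] using this
        have hNT : (pvNew g.2).Perm T := by
          rw [pvNew, ← hT]
          exact PySem.List.sorted_perm _ _ _
        rw [hA, pvG_sorted hTne hpair, pvCnt_perm hNT, ← pvCnt_run hgne hc]
      rw [hcong]
      rfl

theorem pvA_eq_G (L : List String) (hne : ∀ s ∈ L, s.toList ≠ []) :
    calculate_elements L = pvG L :=
  pvA_aux (pvMu L) L (le_refl _) hne

-- ===== VERDICT (by name: the statement is the Claim_ definition above) =====
theorem calculate_elements_spec : Claim_equal_calculate_elements := by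
  intro numbers _ hpre
  unfold Spec_calculate_elements calculate_elements_alt
  by_cases h1 : numbers.length = 1
  · rw [calculate_elements, if_pos h1, if_pos h1]
  · rw [if_neg h1, pvRunLoop_eq]
    apply pvA_eq_G
    intro s hs hnil
    rcases hpre with h | h
    · exact h1 h
    · exact h (String.toList_eq_nil_iff.mp hnil ▸ hs)
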